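-- pv_equiv track=rewrite | github.com/githubuser2000/reta.arch | i18n/words_context.py | finde_mehrfache_vorkommen
-- ===== SOURCE A (Python) =====
-- def finde_mehrfache_vorkommen(stringliste):
--     # Ein Dictionary erstellen, um die Häufigkeit jedes Strings zu zählen
--     haeufigkeiten = {}
--     for string in stringliste:
--         if string in haeufigkeiten:
--             haeufigkeiten[string] += 1
--         else:
--             haeufigkeiten[string] = 1
--
--     # Einträge filtern, deren Häufigkeit größer als 1 ist
--     mehrfach_vorkommende_strings = [
--         string for string, haeufigkeit in haeufigkeiten.items() if haeufigkeit > 1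
--     ]
--
--     return mehrfach_vorkommende_strings
-- ===== SOURCE B (Python) =====
-- def finde_mehrfache_vorkommen(stringliste):
--     # keep each string at its first position iff it occurs more than once
--     return [
--         s
--         for i, s in enumerate(stringliste)
--         if stringliste.count(s) > 1 and stringliste.index(s) == i
--     ]
-- ===== Notes on version B (the rewrite author's own statement) =====
-- stated objective: simpler
-- what changed: B drops the frequency dictionary entirely and emits, via a single comprehension over enumerate, each string at its first position when list.count sees it more than once.
import Mathlib
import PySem

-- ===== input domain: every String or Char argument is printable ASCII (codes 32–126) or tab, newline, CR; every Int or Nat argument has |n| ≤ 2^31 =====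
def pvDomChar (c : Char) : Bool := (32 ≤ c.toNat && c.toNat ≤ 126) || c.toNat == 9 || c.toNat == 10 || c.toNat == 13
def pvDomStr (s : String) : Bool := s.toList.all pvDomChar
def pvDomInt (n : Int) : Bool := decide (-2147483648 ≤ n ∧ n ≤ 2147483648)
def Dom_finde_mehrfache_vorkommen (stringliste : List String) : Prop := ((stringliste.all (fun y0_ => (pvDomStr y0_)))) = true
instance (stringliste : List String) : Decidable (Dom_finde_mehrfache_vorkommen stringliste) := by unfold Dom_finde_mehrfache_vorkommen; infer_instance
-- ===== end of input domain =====

-- One honest line: B replaces A's frequency dictionary with a single comprehension over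
-- enumerate that keeps each string at its first index when its count exceeds 1 (simpler).

-- ===== PORT A =====
def finde_mehrfache_vorkommen (stringliste : List String) : List String :=
  -- haeufigkeiten = {}; for string in stringliste: if string in h: h[string] += 1 else: h[string] = 1
  let haeufigkeiten : PySem.Dict String Int :=
    stringliste.foldl
      (fun d s => if d.contains s then d.insert s (d.getD s 0 + 1) else d.insert s 1)
      PySem.Dict.empty
  -- [string for string, haeufigkeit in haeufigkeiten.items() if haeufigkeit > 1]
  (haeufigkeiten.items.filter (fun p => decide (1 < p.2))).map (·.1)

-- ===== PORT B =====
def finde_mehrfache_vorkommen_alt (stringliste : List String) : List String :=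
  -- [s for i, s in enumerate(stringliste) if stringliste.count(s) > 1 and stringliste.index(s) == i]
  ((PySem.List.enumerate stringliste 0).filter
      (fun p => decide (1 < PySem.List.count stringliste p.2) &&
                ((PySem.List.index? stringliste p.2).map (fun k => (k : Int)) == some p.1))).map
    (·.2)

-- ===== PRECONDITION & SPEC =====
def Spec_finde_mehrfache_vorkommen (stringliste : List String) (out : List String) : Prop := out = finde_mehrfache_vorkommen_alt stringliste
instance (stringliste : List String) (out : List String) : Decidable (Spec_finde_mehrfache_vorkommen stringliste out) := by unfold Spec_finde_mehrfache_vorkommen; infer_instance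

-- ===== CLAIM (what is proved, stated in full; the proofs are below) =====
def Claim_equal_finde_mehrfache_vorkommen : Prop := ∀ (stringliste : List String), Dom_finde_mehrfache_vorkommen stringliste → Spec_finde_mehrfache_vorkommen stringliste (finde_mehrfache_vorkommen stringliste)

-- ===== LEMMAS AND PROOFS =====

-- A's counting loop is Counter(xs): the two branches of the 'if' compute the same insert.
theorem pv_fold_eq_counter (xs : List String) :
    xs.foldl (fun d s => if d.contains s then d.insert s (d.getD s 0 + 1) else d.insert s 1)
      PySem.Dict.empty = PySem.Dict.counter xs := by
  have hf : (fun (d : PySem.Dict String Int) s =>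
      if d.contains s then d.insert s (d.getD s 0 + 1) else d.insert s 1)
      = fun d s => d.insert s (d.getD s 0 + 1) := by
    funext d s
    by_cases h : d.contains s
    · simp [h]
    · have hb : d.contains s = false := by simpa using h
      rw [if_neg (by simp [hb]), PySem.Dict.getD_of_not_contains d (0 : Int) hb]
      norm_num
  rw [hf]
  exact PySem.Dict.foldl_insert_getD_add_one_eq_counter xs

-- filtering the (key, count) items on count > 1 and projecting keys = filtering keys on count
theorem pv_items_map (l xs : List String) :
    ((l.map (fun k => (k, (xs.count k : Int)))).filter (fun p => decide (1 < p.2))).map (·.1)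
      = l.filter (fun s => decide (1 < xs.count s)) := by
  induction l with
  | nil => rfl
  | cons k t ih =>
    by_cases h : 1 < xs.count k
    · simp [h, ih]
    · simp [h, ih]

-- A returns the strings occurring more than once, in first-occurrence order.
theorem pvA_eq (xs : List String) :
    finde_mehrfache_vorkommen xs
      = (PySem.Set.ofList xs).filter (fun s => decide (1 < xs.count s)) := by
  unfold finde_mehrfache_vorkommen
  rw [pv_fold_eq_counter]
  show (((PySem.Dict.counter xs).items.filter (fun p => decide (1 < p.2))).map (·.1)) = _
  rw [PySem.Dict.items_counter, pv_items_map]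

-- projecting snd commutes with a filter that only reads snd
theorem pv_map_snd_filter (l : List (Int × String)) (q : String → Bool) :
    (l.filter (fun p => q p.2)).map (·.2) = (l.map (·.2)).filter q := by
  induction l with
  | nil => rfl
  | cons p t ih =>
    by_cases h : q p.2
    · simp [h, ih]
    · simp [h, ih]

-- Keeping each element at its first index is exactly the ordered dedup.
theorem pv_first_occ (xs : List String) :
    ((PySem.List.enumerate xs 0).filter
        (fun p => (PySem.List.index? xs p.2).map (fun k => (k : Int)) == some p.1)).map (·.2)
      = PySem.Set.ofList xs := by
  induction xs using List.reverseRecOn with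
  | nil => rfl
  | append_singleton xs a ih =>
    have hx : ∀ p ∈ PySem.List.enumerate xs 0,
        ((PySem.List.index? (xs ++ [a]) p.2).map (fun k => (k : Int)) == some p.1)
          = ((PySem.List.index? xs p.2).map (fun k => (k : Int)) == some p.1) := by
      intro p hp
      obtain ⟨k, hk, rfl⟩ := (PySem.List.mem_enumerate_iff xs 0 p).1 hp
      rw [PySem.List.index?_append_of_mem [a] (List.getElem_mem hk)]
    have hofl : PySem.Set.ofList (xs ++ [a]) = PySem.Set.add (PySem.Set.ofList xs) a := by
      rw [PySem.Set.ofList_eq_foldl, List.foldl_append, ← PySem.Set.ofList_eq_foldl]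
      rfl
    rw [PySem.List.enumerate_append, List.filter_append, List.map_append,
      List.filter_congr hx, ih, hofl]
    by_cases hmem : a ∈ xs
    · -- a already seen: the appended copy is not at its first index
      have hs : (PySem.List.index? xs a).isSome :=
        (PySem.List.index?_isSome_iff xs a).2 hmem
      obtain ⟨k, hk⟩ := Option.isSome_iff_exists.1 hs
      obtain ⟨hklt, -, -⟩ := PySem.List.getElem_of_index?_eq_some hk
      have hcond : ((PySem.List.index? (xs ++ [a]) a).map (fun k => (k : Int))
          == some ((0 : Int) + xs.length)) = false := by
        rw [PySem.List.index?_append_of_mem [a] hmem, hk]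
        simp
        omega
      have hadd : PySem.Set.add (PySem.Set.ofList xs) a = PySem.Set.ofList xs := by
        simp [PySem.Set.add, PySem.Set.contains, (PySem.Set.mem_ofList xs a).2 hmem]
      simp only [PySem.List.enumerate_cons, PySem.List.enumerate_nil, List.filter_cons,
        List.filter_nil, hcond]
      simp [hadd]
    · -- fresh a: kept, appended at the end
      have hcond : ((PySem.List.index? (xs ++ [a]) a).map (fun k => (k : Int))
          == some ((0 : Int) + xs.length)) = true := by
        rw [PySem.List.index?_append_singleton_self xs a hmem]
        simp
      have hadd : PySem.Set.add (PySem.Set.ofList xs) a = PySem.Set.ofList xs ++ [a] := by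
        have : a ∉ PySem.Set.ofList xs := fun h => hmem ((PySem.Set.mem_ofList xs a).1 h)
        simp [PySem.Set.add, PySem.Set.contains, this]
      simp only [PySem.List.enumerate_cons, PySem.List.enumerate_nil, List.filter_cons,
        List.filter_nil, hcond]
      simp [hadd]

theorem pvB_eq (xs : List String) :
    finde_mehrfache_vorkommen_alt xs
      = (PySem.Set.ofList xs).filter (fun s => decide (1 < xs.count s)) := by
  unfold finde_mehrfache_vorkommen_alt
  have hsw : ((PySem.List.enumerate xs 0).filter
      (fun p => decide (1 < PySem.List.count xs p.2) &&
                ((PySem.List.index? xs p.2).map (fun k => (k : Int)) == some p.1)))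
      = (((PySem.List.enumerate xs 0).filter
          (fun p => (PySem.List.index? xs p.2).map (fun k => (k : Int)) == some p.1)).filter
          (fun p => decide (1 < PySem.List.count xs p.2))) := by
    rw [List.filter_filter]
  rw [hsw, pv_map_snd_filter _ (fun s => decide (1 < PySem.List.count xs s)), pv_first_occ]
  exact List.filter_congr (fun s _ => by rw [PySem.List.count_eq])

-- ===== VERDICT (by name: the statement is the Claim_ definition above) =====
theorem finde_mehrfache_vorkommen_spec : Claim_equal_finde_mehrfache_vorkommen := by
  intro xs _
  unfold Spec_finde_mehrfache_vorkommen
  rw [pvA_eq, pvB_eq]
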